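-- pv_equiv track=rewrite | github.com/wkiri/MTE | src/ingest_sqlite.py | update_primary_author
-- ===== SOURCE A (Python) =====
-- def update_primary_author(rec):
--     # Only apply the following logic if the primary_author field is empty
--     if len(rec['primary_author']) > 0:
--         return rec
--
--     au = rec['authors']
--     auwords = au.split()
--     pa = ''
--     in_last_name = False
--     for auw in auwords:
--         if len(auw) > 1 and auw[0].isalpha():
--             if in_last_name:
--                 pa += (' ' + auw)
--             else:
--                 pa = auw
--                 in_last_name = True
--         else:
--             if in_last_name:  # Done!
--                 break
--
--     # If it ends with a comma, remove it
--     pa = pa.split(',')[0]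
--
--     rec['primary_author'] = pa
--     return rec
-- ===== SOURCE B (Python) =====
-- def _good(w):
--     return len(w) > 1 and w[0].isalpha()
--
--
-- def update_primary_author(rec):
--     if len(rec['primary_author']) > 0:
--         return rec
--     words = rec['authors'].split()
--     # drop leading non-name tokens, then take the first maximal run of name tokens
--     while words and not _good(words[0]):
--         words = words[1:]
--     run = []
--     while words and _good(words[0]):
--         run.append(words[0])
--         words = words[1:]
--     rec['primary_author'] = ' '.join(run).split(',')[0]
--     return rec
-- ===== Notes on version B (the rewrite author's own statement) =====
-- stated objective: simpler
-- what changed: Replaced A's stateful flag-and-break accumulator loop (string concatenation under an in_last_name flag) by a two-phase decomposition: drop leading non-name tokens, take the first maximal run of name tokens, then join it with spaces.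
-- outside the precondition, e.g. on update_primary_author({'authors': 'Smith, J.'}): A raises KeyError, B raises KeyError; on update_primary_author({'primary_author': '', 'name': 'x'}): A raises KeyError, B raises KeyError
import Mathlib
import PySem

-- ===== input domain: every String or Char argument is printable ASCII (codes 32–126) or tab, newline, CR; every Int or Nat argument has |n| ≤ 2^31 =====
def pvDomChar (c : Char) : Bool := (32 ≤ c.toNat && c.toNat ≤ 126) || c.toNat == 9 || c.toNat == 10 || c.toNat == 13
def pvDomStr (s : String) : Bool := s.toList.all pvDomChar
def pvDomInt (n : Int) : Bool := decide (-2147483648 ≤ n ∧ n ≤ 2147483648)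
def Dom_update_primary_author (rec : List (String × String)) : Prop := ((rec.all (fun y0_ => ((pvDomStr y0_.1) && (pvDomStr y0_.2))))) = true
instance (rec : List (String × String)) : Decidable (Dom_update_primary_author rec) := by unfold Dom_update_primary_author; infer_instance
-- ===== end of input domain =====

-- B replaces A's stateful flag-and-break loop by a drop-leading-bad / take-first-good-run
-- decomposition (objective: simpler). Python A mutates rec in place; the equivalence here is
-- about the returned dict value (B performs the same mutation).

-- ===== PORT A =====
-- A's single loop with the in_last_name flag and the break
def pvLoopA : List (List Char) → List Char → Bool → List Char
  | [], pa, _ => pa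
  | auw :: rest, pa, inLastName =>
    if decide (1 < auw.length) && PySem.Chars.isalpha (auw.headD ' ') then
      if inLastName then pvLoopA rest (pa ++ (' ' :: auw)) true
      else pvLoopA rest auw true
    else
      if inLastName then pa else pvLoopA rest pa inLastName

def update_primary_author (rec : List (String × String)) : List (String × String) :=
  let d := PySem.Dict.ofList rec
  match d.get? "primary_author" with
  | none => d.items                               -- KeyError: excluded by Pre_
  | some pa0 =>
    if 0 < PySem.Str.len pa0 then d.items
    else
      match d.get? "authors" with
      | none => d.items                           -- KeyError: excluded by Pre_
      | some au =>
        let auwords := PySem.Chars.split₀ au.toList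
        let pa := pvLoopA auwords [] false
        let pa := (PySem.Chars.splitOn pa [',']).headD []
        (d.insert "primary_author" (String.ofList pa)).items

-- ===== PORT B =====
def pvGood (w : List Char) : Bool := decide (1 < w.length) && PySem.Chars.isalpha (w.headD ' ')

-- B's first while loop: drop leading tokens that are not name tokens
def pvDropBad : List (List Char) → List (List Char)
  | [] => []
  | w :: ws => if pvGood w then w :: ws else pvDropBad ws

-- B's second while loop: collect the first maximal run of name tokens
def pvTakeGood : List (List Char) → List (List Char)
  | [] => []
  | w :: ws => if pvGood w then w :: pvTakeGood ws else []

def update_primary_author_alt (rec : List (String × String)) : List (String × String) :=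
  let d := PySem.Dict.ofList rec
  match d.get? "primary_author" with
  | none => d.items                               -- KeyError: excluded by Pre_
  | some pa0 =>
    if 0 < PySem.Str.len pa0 then d.items
    else
      match d.get? "authors" with
      | none => d.items                           -- KeyError: excluded by Pre_
      | some au =>
        let words := PySem.Chars.split₀ au.toList
        let run := pvTakeGood (pvDropBad words)
        let pa := (PySem.Chars.splitOn (PySem.Chars.join [' '] run) [',']).headD []
        (d.insert "primary_author" (String.ofList pa)).items

-- ===== PRECONDITION & SPEC =====
-- Pre_ excludes exactly the dicts on which the Python raises KeyError: no 'primary_author' key,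
-- or an empty 'primary_author' with no 'authors' key.
def Pre_update_primary_author (rec : List (String × String)) : Prop :=
  ((PySem.Dict.ofList rec).get? "primary_author").isSome ∧
  ((PySem.Dict.ofList rec).get? "primary_author" = some "" →
    ((PySem.Dict.ofList rec).get? "authors").isSome)
instance (rec : List (String × String)) : Decidable (Pre_update_primary_author rec) := by
  unfold Pre_update_primary_author; infer_instance

def pvWitness_update_primary_author : (List (String × String)) :=
  [("primary_author", ""), ("authors", "Smith, J. and Jones, B.")]

def Spec_update_primary_author (rec : List (String × String)) (out : List (String × String)) : Prop := out = update_primary_author_alt rec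
instance (rec : List (String × String)) (out : List (String × String)) : Decidable (Spec_update_primary_author rec out) := by unfold Spec_update_primary_author; infer_instance

-- ===== CLAIM (what is proved, stated in full; the proofs are below) =====
def Claim_equal_update_primary_author : Prop := ∀ (rec : List (String × String)), Dom_update_primary_author rec → Pre_update_primary_author rec → Spec_update_primary_author rec (update_primary_author rec)

-- ===== LEMMAS AND PROOFS =====

-- tail part of the joined run: every later word carries a leading space
def pvTailJoin (run : List (List Char)) : List Char := (run.map (fun w => ' ' :: w)).flatten

theorem pvLoopA_true (ws : List (List Char)) :
    ∀ pa, pvLoopA ws pa true = pa ++ pvTailJoin (pvTakeGood ws) := by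
  induction ws with
  | nil => intro pa; simp [pvLoopA, pvTakeGood, pvTailJoin]
  | cons w ws ih =>
    intro pa
    by_cases h : pvGood w
    · have h' := h
      unfold pvGood at h'
      simp only [pvLoopA, h', if_true, pvTakeGood, h, ih, pvTailJoin]
      simp
    · have h' : (decide (1 < w.length) && PySem.Chars.isalpha (w.headD ' ')) = false := by
        simpa [pvGood] using h
      simp only [pvLoopA, h', Bool.false_eq_true, if_false, pvTakeGood, h, pvTailJoin]
      simp

theorem pvJoin_run (w : List Char) (run : List (List Char)) :
    PySem.Chars.join [' '] (w :: run) = w ++ pvTailJoin run := by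
  induction run generalizing w with
  | nil => simp [PySem.Chars.join_singleton, pvTailJoin]
  | cons q rest ih =>
    rw [PySem.Chars.join_cons_cons, ih q]
    simp [pvTailJoin]

theorem pvLoopA_eq_join (ws : List (List Char)) :
    pvLoopA ws [] false = PySem.Chars.join [' '] (pvTakeGood (pvDropBad ws)) := by
  induction ws with
  | nil => simp [pvLoopA, pvDropBad, pvTakeGood, PySem.Chars.join_nil]
  | cons w ws ih =>
    by_cases h : pvGood w
    · have h' := h
      unfold pvGood at h'
      simp only [pvLoopA, h', pvDropBad, h, if_pos, pvTakeGood]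
      rw [pvJoin_run]
      exact pvLoopA_true ws w
    · have h' : (decide (1 < w.length) && PySem.Chars.isalpha (w.headD ' ')) = false := by
        simpa [pvGood] using h
      simp only [pvLoopA, h', Bool.false_eq_true, if_false, pvDropBad, h, ih]

-- ===== VERDICT (by name: the statement is the Claim_ definition above) =====
theorem update_primary_author_spec : Claim_equal_update_primary_author := by
  intro rec _ _
  unfold Spec_update_primary_author update_primary_author update_primary_author_alt
  simp only [pvLoopA_eq_join]
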